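-- pv_equiv track=rewrite | github.com/CMarcoBioinfo/TRGT_Clinical_Parser | scripts/core/motif_utils.py | compute_interruption_bp
-- ===== SOURCE A (Python) =====
-- def compute_interruption_bp(segmentation, motif_group):
--     """
--     Calcule :
--       - i_bp : taille totale des interruptions internes (en bp)
--       - i_count : nombre d'interruptions internes
--     Une interruption interne est un segment non-groupe situé
--     entre le premier et le dernier segment du motif_group.
--     """
--
--     # Indices des segments appartenant au motif_group
--     group_indices = [
--         i for i, (motif, start, end) in enumerate(segmentation)
--         if motif in motif_group
--     ]
--     if not group_indices:
--         return 0, 0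
--
--     first_idx = group_indices[0]
--     last_idx = group_indices[-1]
--
--     interruption_bp = 0
--     interruption_count = 0
--
--     # Ne parcourir que la fenêtre interne
--     for motif, start, end in segmentation[first_idx:last_idx+1]:
--         if motif not in motif_group:
--             interruption_bp += (end - start)
--             interruption_count += 1
--
--     return interruption_bp, interruption_count
-- ===== SOURCE B (Python) =====
-- def compute_interruption_bp(segmentation, motif_group):
--     """Single pass: buffer non-group segments after the first group segment,
--     commit the buffer only when a later group segment proves they are internal."""
--     seen_group = False
--     pending_bp = 0
--     pending_count = 0
--     total_bp = 0
--     total_count = 0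
--     for motif, start, end in segmentation:
--         if motif in motif_group:
--             total_bp += pending_bp
--             total_count += pending_count
--             pending_bp = 0
--             pending_count = 0
--             seen_group = True
--         elif seen_group:
--             pending_bp += end - start
--             pending_count += 1
--     return total_bp, total_count
-- ===== Notes on version B (the rewrite author's own statement) =====
-- stated objective: simpler
-- what changed: Replaced the three-pass index/slice approach (enumerate indices, slice the first-to-last group window, re-scan it) by a single pass that buffers non-group segment sizes after a group segment and commits the buffer only when a later group segment is seen.
import Mathlib
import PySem

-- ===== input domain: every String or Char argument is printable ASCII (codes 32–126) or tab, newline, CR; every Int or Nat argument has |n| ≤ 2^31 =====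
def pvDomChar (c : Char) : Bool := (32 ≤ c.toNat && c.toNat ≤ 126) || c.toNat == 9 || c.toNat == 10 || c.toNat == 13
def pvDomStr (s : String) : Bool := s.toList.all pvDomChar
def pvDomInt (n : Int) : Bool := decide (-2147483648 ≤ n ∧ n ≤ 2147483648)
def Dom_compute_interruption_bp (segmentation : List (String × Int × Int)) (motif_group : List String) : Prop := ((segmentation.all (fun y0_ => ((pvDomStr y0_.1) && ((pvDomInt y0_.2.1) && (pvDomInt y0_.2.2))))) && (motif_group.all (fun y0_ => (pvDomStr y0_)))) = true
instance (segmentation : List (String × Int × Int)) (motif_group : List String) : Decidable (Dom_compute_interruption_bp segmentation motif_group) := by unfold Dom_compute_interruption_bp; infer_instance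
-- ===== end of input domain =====

-- B replaces A's three passes (index list, slice, re-scan) by one pass with a pending buffer; objective: simpler.

-- ===== PORT A =====
-- group_indices: [i for i, (motif, start, end) in enumerate(segmentation) if motif in motif_group]
-- group_indices[0] / group_indices[-1] are ported as headD 0 / getLastD 0: exact because both
-- accesses are guarded by the nonemptiness test.
def compute_interruption_bp (segmentation : List (String × Int × Int)) (motif_group : List String) : Int × Int :=
  let group_indices : List Int :=
    ((PySem.List.enumerate segmentation 0).filter (fun p => motif_group.contains p.2.1)).map (·.1)
  if group_indices = [] then (0, 0)
  else
    let first_idx := group_indices.headD 0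
    let last_idx := group_indices.getLastD 0
    let window := PySem.List.slice segmentation (some first_idx) (some (last_idx + 1))
    window.foldl
      (fun acc x =>
        if motif_group.contains x.1 then acc
        else (acc.1 + (x.2.2 - x.2.1), acc.2 + 1))
      (0, 0)

-- ===== PORT B =====
-- state = (seen_group, pending_bp, pending_count, total_bp, total_count)
def compute_interruption_bp_alt (segmentation : List (String × Int × Int)) (motif_group : List String) : Int × Int :=
  let st := segmentation.foldl
    (fun (st : Bool × Int × Int × Int × Int) x =>
      let (seen, pbp, pc, tbp, tc) := st
      if motif_group.contains x.1 then (true, 0, 0, tbp + pbp, tc + pc)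
      else if seen then (seen, pbp + (x.2.2 - x.2.1), pc + 1, tbp, tc)
      else st)
    (false, 0, 0, 0, 0)
  (st.2.2.2.1, st.2.2.2.2)

-- ===== PRECONDITION & SPEC =====
def Spec_compute_interruption_bp (segmentation : List (String × Int × Int)) (motif_group : List String) (out : Int × Int) : Prop := out = compute_interruption_bp_alt segmentation motif_group
instance (segmentation : List (String × Int × Int)) (motif_group : List String) (out : Int × Int) : Decidable (Spec_compute_interruption_bp segmentation motif_group out) := by unfold Spec_compute_interruption_bp; infer_instance

-- ===== CLAIM (what is proved, stated in full; the proofs are below) =====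
def Claim_equal_compute_interruption_bp : Prop := ∀ (segmentation : List (String × Int × Int)) (motif_group : List String), Dom_compute_interruption_bp segmentation motif_group → Spec_compute_interruption_bp segmentation motif_group (compute_interruption_bp segmentation motif_group)

-- ===== LEMMAS AND PROOFS =====

-- abbreviation used throughout: a segment belongs to the group
def pvG (mg : List String) (x : String × Int × Int) : Bool := mg.contains x.1

-- list of (nat) indices of group segments
def pvGi (mg : List String) : List (String × Int × Int) → List Nat
  | [] => []
  | x :: t => if pvG mg x then 0 :: (pvGi mg t).map (· + 1) else (pvGi mg t).map (· + 1)

-- sum of (end-start, 1) over non-group segments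
def pvSum (mg : List String) : List (String × Int × Int) → Int × Int
  | [] => (0, 0)
  | x :: t =>
    let r := pvSum mg t
    if pvG mg x then r else ((x.2.2 - x.2.1) + r.1, 1 + r.2)

-- reference value once a group segment has been seen: non-group segments followed by a later group segment
def pvIn (mg : List String) : List (String × Int × Int) → Int × Int
  | [] => (0, 0)
  | x :: t =>
    let r := pvIn mg t
    if !pvG mg x && t.any (pvG mg) then (r.1 + (x.2.2 - x.2.1), r.2 + 1) else r

-- reference value overall: skip the prefix before the first group segment
def pvAll (mg : List String) : List (String × Int × Int) → Int × Int
  | [] => (0, 0)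
  | x :: t => if pvG mg x then pvIn mg t else pvAll mg t

lemma pv_getLastD_map {α β : Type} (f : α → β) (l : List α) (d : β) (d0 : α) (hu : l ≠ []) :
    (l.map f).getLastD d = f (l.getLastD d0) := by
  rw [List.getLastD_eq_getLast?, List.getLastD_eq_getLast?, List.getLast?_map,
      List.getLast?_eq_some_getLast hu]
  rfl

lemma pvGi_eq_nil_iff (mg : List String) (l : List (String × Int × Int)) :
    pvGi mg l = [] ↔ l.any (pvG mg) = false := by
  induction l with
  | nil => simp [pvGi]
  | cons x t ih =>
    by_cases h : pvG mg x = true <;> simp [pvGi, h, ih]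

lemma pvIn_no_group (mg : List String) (l : List (String × Int × Int))
    (h : l.any (pvG mg) = false) : pvIn mg l = (0, 0) := by
  induction l with
  | nil => rfl
  | cons x t ih =>
    simp only [List.any_cons, Bool.or_eq_false_iff] at h
    simp [pvIn, ih h.2, h.2]

lemma pvAll_no_group (mg : List String) (l : List (String × Int × Int))
    (h : l.any (pvG mg) = false) : pvAll mg l = (0, 0) := by
  induction l with
  | nil => rfl
  | cons x t ih =>
    simp only [List.any_cons, Bool.or_eq_false_iff] at h
    simp [pvAll, h.1, ih h.2]

-- A's window fold with a general accumulator
lemma foldA_eq (mg : List String) (l : List (String × Int × Int)) (a b : Int) :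
    l.foldl (fun acc x => if mg.contains x.1 then acc
                          else (acc.1 + (x.2.2 - x.2.1), acc.2 + 1)) (a, b)
      = (a + (pvSum mg l).1, b + (pvSum mg l).2) := by
  induction l generalizing a b with
  | nil => simp [pvSum]
  | cons x t ih =>
    simp only [List.foldl_cons]
    by_cases h : pvG mg x = true
    · rw [if_pos (by simpa [pvG] using h), ih, pvSum]
      simp only [h, if_pos]
    · simp only [Bool.not_eq_true] at h
      rw [if_neg (by simpa [pvG] using h), ih, pvSum]
      simp only [h, Bool.false_eq_true, if_false, Prod.mk.injEq]
      constructor <;> ring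

-- take up to (and including) the last group index sums to pvIn
lemma take_last_eq_pvIn (mg : List String) (l : List (String × Int × Int))
    (h : pvGi mg l ≠ []) :
    pvSum mg (l.take ((pvGi mg l).getLastD 0 + 1)) = pvIn mg l := by
  induction l with
  | nil => simp [pvGi] at h
  | cons x t ih =>
    by_cases hu : pvGi mg t = []
    · -- no group in the tail, so the head must be group
      have hany : t.any (pvG mg) = false := (pvGi_eq_nil_iff mg t).mp hu
      by_cases hx : pvG mg x = true
      · simp [pvGi, hx, hu, pvSum, pvIn, hany, pvIn_no_group mg t hany]
      · simp [pvGi, hx, hu] at h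
    · have hlst : ((pvGi mg t).map (· + 1)).getLastD 0 = (pvGi mg t).getLastD 0 + 1 :=
        pv_getLastD_map (· + 1) (pvGi mg t) 0 0 hu
      have hany : t.any (pvG mg) = true := by
        cases ha : t.any (pvG mg)
        · exact absurd ((pvGi_eq_nil_iff mg t).mpr ha) hu
        · rfl
      have ihu := ih hu
      by_cases hx : pvG mg x = true
      · have hc : (pvGi mg (x :: t)).getLastD 0 = (pvGi mg t).getLastD 0 + 1 := by
          simp only [pvGi, hx, if_pos, List.getLastD_cons]
          exact pv_getLastD_map (· + 1) (pvGi mg t) 0 0 hu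
        rw [hc, List.take_succ_cons, pvSum, pvIn]
        simp only [hx, if_pos, Bool.not_true, Bool.false_and, Bool.false_eq_true, if_false]
        simpa using ihu
      · have hc : (pvGi mg (x :: t)).getLastD 0 = (pvGi mg t).getLastD 0 + 1 := by
          simp only [pvGi, hx, Bool.false_eq_true, if_false]
          exact hlst
        rw [hc, List.take_succ_cons, pvSum, pvIn]
        have hx' : pvG mg x = false := by simpa using hx
        simp only [hx', Bool.not_false, hany, Bool.and_self, if_true, Bool.false_eq_true, if_false]
        rw [show pvSum mg (List.take ((pvGi mg t).getLastD 0 + 1) t) = pvIn mg t from by simpa using ihu]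
        simp only [Prod.mk.injEq]
        constructor <;> ring

-- nat-index form of A's value
lemma A_nat (mg : List String) (l : List (String × Int × Int)) (h : pvGi mg l ≠ []) :
    pvSum mg ((l.drop ((pvGi mg l).headD 0)).take
        ((pvGi mg l).getLastD 0 + 1 - (pvGi mg l).headD 0)) = pvAll mg l := by
  induction l with
  | nil => simp [pvGi] at h
  | cons x t ih =>
    by_cases hx : pvG mg x = true
    · have h0 : (pvGi mg (x :: t)).headD 0 = 0 := by simp [pvGi, hx]
      rw [h0]
      simp only [Nat.sub_zero, List.drop_zero]
      rw [take_last_eq_pvIn mg (x :: t) h]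
      simp [pvAll, pvIn, hx]
    · simp only [pvGi, hx, Bool.false_eq_true, if_false] at h ⊢
      have hu : pvGi mg t ≠ [] := by simpa using h
      obtain ⟨f, ft, hft⟩ : ∃ f ft, pvGi mg t = f :: ft :=
        ⟨_, _, (List.cons_head!_tail hu).symm⟩
      have hhead : ((pvGi mg t).map (· + 1)).headD 0 = (pvGi mg t).headD 0 + 1 := by
        rw [hft]; simp
      have hlst : ((pvGi mg t).map (· + 1)).getLastD 0 = (pvGi mg t).getLastD 0 + 1 :=
        pv_getLastD_map (· + 1) (pvGi mg t) 0 0 hu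
      rw [hhead, hlst]
      have heq : (pvGi mg t).getLastD 0 + 1 + 1 - ((pvGi mg t).headD 0 + 1)
           = (pvGi mg t).getLastD 0 + 1 - (pvGi mg t).headD 0 := by omega
      rw [heq, List.drop_succ_cons, ih hu]
      simp [pvAll, hx]

-- the Int index list A builds is the cast of pvGi
lemma giS_eq (mg : List String) (l : List (String × Int × Int)) (s : Int) :
    ((PySem.List.enumerate l s).filter (fun p => mg.contains p.2.1)).map (·.1)
      = (pvGi mg l).map (fun (k : Nat) => s + (k : Int)) := by
  induction l generalizing s with
  | nil => simp [PySem.List.enumerate_nil, pvGi]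
  | cons x t ih =>
    rw [PySem.List.enumerate_cons]
    by_cases hx : pvG mg x = true
    · rw [List.filter_cons_of_pos (by simpa [pvG] using hx)]
      simp only [pvGi, hx, if_pos, List.map_cons, List.map_map, ih (s + 1)]
      refine congrArg₂ _ (by ring) ?_
      apply List.map_congr_left
      intro k _
      simp only [Function.comp]
      push_cast
      ring
    · have hx' : pvG mg x = false := by simpa using hx
      rw [List.filter_cons_of_neg (by simpa [pvG] using hx')]
      simp only [pvGi, hx', Bool.false_eq_true, if_false, ih (s + 1), List.map_map]
      apply List.map_congr_left
      intro k _
      simp only [Function.comp]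
      push_cast
      ring

-- B's fold after a group segment has been seen
lemma foldB_seen (mg : List String) (l : List (String × Int × Int))
    (pbp pc tbp tc : Int) :
    (let st := l.foldl
        (fun (st : Bool × Int × Int × Int × Int) x =>
          let (seen, pbp, pc, tbp, tc) := st
          if mg.contains x.1 then (true, 0, 0, tbp + pbp, tc + pc)
          else if seen then (seen, pbp + (x.2.2 - x.2.1), pc + 1, tbp, tc)
          else st)
        (true, pbp, pc, tbp, tc)
     (st.2.2.2.1, st.2.2.2.2))
    = (tbp + (if l.any (pvG mg) then pbp else 0) + (pvIn mg l).1,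
       tc + (if l.any (pvG mg) then pc else 0) + (pvIn mg l).2) := by
  induction l generalizing pbp pc tbp tc with
  | nil => simp [pvIn]
  | cons x t ih =>
    by_cases hx : pvG mg x = true
    · simp only [pvG] at hx
      simp only [List.foldl_cons, hx, if_pos]
      rw [ih]
      simp only [List.any_cons, pvG, hx, Bool.true_or, if_true, pvIn]
      simp only [pvG, hx, Bool.not_true, Bool.false_and, Bool.false_eq_true, if_false]
      by_cases ha : t.any (pvG mg) = true <;>
        simp only [ha, if_true, Bool.false_eq_true, if_false, Prod.mk.injEq] <;>
        constructor <;> ring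
    · simp only [pvG, Bool.not_eq_true] at hx
      simp only [List.foldl_cons, hx, Bool.false_eq_true, if_false, if_pos]
      rw [ih]
      simp only [List.any_cons, pvG, hx, Bool.false_or, pvIn]
      simp only [pvG, hx, Bool.not_false, Bool.true_and]
      by_cases ha : t.any (pvG mg) = true <;>
        simp only [ha, if_true, Bool.false_eq_true, if_false, Prod.mk.injEq] <;>
        constructor <;> ring

-- B equals the reference
lemma B_eq (mg : List String) (l : List (String × Int × Int)) :
    compute_interruption_bp_alt l mg = pvAll mg l := by
  induction l with
  | nil => rfl
  | cons x t ih =>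
    by_cases hx : pvG mg x = true
    · simp only [pvG] at hx
      unfold compute_interruption_bp_alt
      simp only [List.foldl_cons, hx, if_pos]
      have hfold := foldB_seen mg t 0 0 0 0
      simp only at hfold
      simp only [add_zero]
      rw [hfold]
      simp only [pvAll, pvG, hx, if_pos]
      by_cases ha : t.any (pvG mg) = true <;> simp [ha]
    · simp only [pvG, Bool.not_eq_true] at hx
      unfold compute_interruption_bp_alt at ih ⊢
      simp only [List.foldl_cons, hx, Bool.false_eq_true, if_false]
      rw [ih]
      have hx' : ¬ x.1 ∈ mg := by simpa using hx
      simp [pvAll, pvG, hx']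

-- A equals the reference
lemma A_eq (mg : List String) (l : List (String × Int × Int)) :
    compute_interruption_bp l mg = pvAll mg l := by
  unfold compute_interruption_bp
  rw [giS_eq mg l 0]
  by_cases h : pvGi mg l = []
  · simp only [h, List.map_nil, if_pos]
    exact (pvAll_no_group mg l ((pvGi_eq_nil_iff mg l).mp h)).symm
  · have hm : (pvGi mg l).map (fun (k : Nat) => (0 : Int) + (k : Int)) ≠ [] := by simpa using h
    simp only [hm, if_neg, not_false_eq_true]
    obtain ⟨f, ft, hft⟩ : ∃ f ft, pvGi mg l = f :: ft :=
      ⟨_, _, (List.cons_head!_tail h).symm⟩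
    have hhead : ((pvGi mg l).map (fun (k : Nat) => (0 : Int) + (k : Int))).headD 0
        = ((pvGi mg l).headD 0 : Int) := by rw [hft]; simp
    have hlast : ((pvGi mg l).map (fun (k : Nat) => (0 : Int) + (k : Int))).getLastD 0
        = ((pvGi mg l).getLastD 0 : Int) := by
      rw [pv_getLastD_map (fun (k : Nat) => (0 : Int) + (k : Int)) (pvGi mg l) 0 0 h]
      ring
    rw [hhead, hlast]
    have hcast : ((pvGi mg l).getLastD 0 : Int) + 1 = (((pvGi mg l).getLastD 0 + 1 : Nat) : Int) := by
      push_cast; ring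
    rw [hcast, PySem.List.slice_natCast, foldA_eq mg _ 0 0, A_nat mg l h]
    simp

-- ===== VERDICT (by name: the statement is the Claim_ definition above) =====
theorem compute_interruption_bp_spec : Claim_equal_compute_interruption_bp := by
  intro seg mg _
  unfold Spec_compute_interruption_bp
  rw [A_eq mg seg, B_eq mg seg]
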